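-- pv_equiv track=rewrite | github.com/LiaoBoWen/MyProject | Leaning/NLP_project/#阅读理解/data_preprocess.py | listwise_data
-- ===== SOURCE A (Python) =====
-- def listwise_data(corpus):
--     '''得到(Q, A relate to the Q)的格式'''
--     listwise_data = dict()
--     for sample in corpus:
--         qid, q, aid, a, label = sample
--         listwise_data.setdefault(qid,dict())
--         listwise_data[qid].setdefault('a',list())
--         listwise_data[qid]['q'] = q
--         listwise_data[qid]['a'].append(a)
--     real_listwise_corpus = []
--     for qid in listwise_data:
--         q = listwise_data[qid]['q']
--         alist = listwise_data[qid]['a']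
--         real_listwise_corpus.append((q,alist))
--     return real_listwise_corpus
-- ===== SOURCE B (Python) =====
-- def listwise_data(corpus):
--     '''得到(Q, A relate to the Q)的格式 — dict-free staged passes: first collect
--     the question ids in first-appearance order, then for each qid rescan the
--     corpus to gather its answers and last-seen question text.'''
--     seen = []
--     for sample in corpus:
--         if sample[0] not in seen:
--             seen.append(sample[0])
--     out = []
--     for qid in seen:
--         q = ""
--         alist = []
--         for qid2, q2, aid, a, label in corpus:
--             if qid2 == qid:
--                 q = q2
--                 alist.append(a)
--         out.append((q, alist))
--     return out
-- ===== Notes on version B (the rewrite author's own statement) =====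
-- stated objective: alternative
-- what changed: Replaces A's single-pass dict grouping (nested dict keyed by qid, then emit) with dict-free staged passes: one pass collecting distinct qids in first-appearance order, then a nested rescan of the corpus per qid to gather its answers and last question text.
import Mathlib
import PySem

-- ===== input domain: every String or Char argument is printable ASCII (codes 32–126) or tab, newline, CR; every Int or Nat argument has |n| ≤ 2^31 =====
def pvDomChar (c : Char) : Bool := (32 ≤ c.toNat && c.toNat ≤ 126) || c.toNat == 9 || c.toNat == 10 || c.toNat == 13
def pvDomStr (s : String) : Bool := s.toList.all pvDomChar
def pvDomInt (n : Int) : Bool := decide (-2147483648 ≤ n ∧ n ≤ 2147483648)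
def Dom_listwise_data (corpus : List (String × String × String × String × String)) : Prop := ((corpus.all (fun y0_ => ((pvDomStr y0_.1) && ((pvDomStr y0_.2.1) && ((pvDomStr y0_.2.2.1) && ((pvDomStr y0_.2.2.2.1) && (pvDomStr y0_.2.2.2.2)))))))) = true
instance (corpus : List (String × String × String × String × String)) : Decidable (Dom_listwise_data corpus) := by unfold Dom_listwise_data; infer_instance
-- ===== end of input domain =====

-- B replaces A's dict grouping with dict-free staged passes (distinct qids in
-- first-appearance order, then a rescan of the corpus per qid); objective:
-- alternative algorithm, not faster.

-- ===== PORT A =====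
-- A's inner dict always has exactly the keys 'q' (a string) and 'a' (a list);
-- it is represented as the pair (q-value, a-list).
def listwise_data (corpus : List (String × String × String × String × String)) : List (String × List String) :=
  -- first loop: listwise_data.setdefault(qid, dict()); [qid].setdefault('a', []); [qid]['q'] = q; [qid]['a'].append(a)
  let d : PySem.Dict String (String × List String) :=
    corpus.foldl (fun d s =>
      let (qid, q, _aid, a, _label) := s
      let d := d.setdefault qid ("", [])
      d.insert qid (q, (d.getD qid ("", [])).2 ++ [a])) PySem.Dict.empty
  -- second loop: for qid in listwise_data: append (q, alist)
  d.keys.foldl (fun acc qid =>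
    let q := (d.getD qid ("", [])).1
    let alist := (d.getD qid ("", [])).2
    acc ++ [(q, alist)]) []

-- ===== PORT B =====
def listwise_data_alt (corpus : List (String × String × String × String × String)) : List (String × List String) :=
  -- pass 1: seen = distinct qids in first-appearance order
  let seen : List String :=
    corpus.foldl (fun seen s => if s.1 ∈ seen then seen else seen ++ [s.1]) []
  -- pass 2: for each qid, rescan the corpus for its q (last wins) and answers
  seen.foldl (fun out qid =>
    let st := corpus.foldl (fun (st : String × List String) s =>
      if s.1 = qid then (s.2.1, st.2 ++ [s.2.2.2.1]) else st) ("", [])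
    out ++ [(st.1, st.2)]) []

-- ===== PRECONDITION & SPEC =====
def Spec_listwise_data (corpus : List (String × String × String × String × String)) (out : List (String × List String)) : Prop := out = listwise_data_alt corpus
instance (corpus : List (String × String × String × String × String)) (out : List (String × List String)) : Decidable (Spec_listwise_data corpus out) := by unfold Spec_listwise_data; infer_instance

-- ===== CLAIM =====
def Claim_equal_listwise_data : Prop := ∀ (corpus : List (String × String × String × String × String)), Dom_listwise_data corpus → Spec_listwise_data corpus (listwise_data corpus)

-- ===== LEMMAS AND PROOFS =====

-- the loop bodies, named for the invariant proof
def pvStepA (d : PySem.Dict String (String × List String)) (s : String × String × String × String × String) : PySem.Dict String (String × List String) :=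
  let (qid, q, _aid, a, _label) := s
  let d := d.setdefault qid ("", [])
  d.insert qid (q, (d.getD qid ("", [])).2 ++ [a])

def pvSeenStep (seen : List String) (s : String × String × String × String × String) : List String :=
  if s.1 ∈ seen then seen else seen ++ [s.1]

def pvInner (p : List (String × String × String × String × String)) (qid : String) : String × List String :=
  p.foldl (fun (st : String × List String) s =>
    if s.1 = qid then (s.2.1, st.2 ++ [s.2.2.2.1]) else st) ("", [])

-- invariant tying A's dict after a prefix p to B's two staged scans of p
def pvInv (p : List (String × String × String × String × String)) : Prop :=
  let d := p.foldl pvStepA PySem.Dict.empty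
  d.keys.Nodup ∧
  d.keys = p.foldl pvSeenStep [] ∧
  (∀ qid ∈ d.keys, d.getD qid ("", []) = pvInner p qid) ∧
  (∀ qid, qid ∉ d.keys → pvInner p qid = ("", []))

lemma pvInner_append (p : List (String × String × String × String × String))
    (s : String × String × String × String × String) (qid : String) :
    pvInner (p ++ [s]) qid =
      (if s.1 = qid then ((s.2.1, (pvInner p qid).2 ++ [s.2.2.2.1]) : String × List String)
       else pvInner p qid) := by
  simp [pvInner, List.foldl_append]

lemma pvInv_step (p : List (String × String × String × String × String))
    (s : String × String × String × String × String) (h : pvInv p) :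
    pvInv (p ++ [s]) := by
  obtain ⟨hnd, hseen, hmem, hnmem⟩ := h
  set d := p.foldl pvStepA PySem.Dict.empty with hd
  have hfold : (p ++ [s]).foldl pvStepA PySem.Dict.empty = pvStepA d s := by
    simp [List.foldl_append, hd]
  have hsfold : (p ++ [s]).foldl pvSeenStep [] = pvSeenStep (p.foldl pvSeenStep []) s := by
    simp [List.foldl_append]
  obtain ⟨qid, q, aid, a, label⟩ := s
  by_cases hc : d.contains qid = true
  · -- qid already grouped: A overwrites in place, seen unchanged
    have hmemk : qid ∈ d.keys := (PySem.Dict.contains_iff_mem_keys d qid).mp hc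
    have hstep : pvStepA d (qid, q, aid, a, label) =
        d.insert qid (q, (d.getD qid ("", [])).2 ++ [a]) := by
      simp [pvStepA, PySem.Dict.setdefault_of_contains d _ hc]
    refine ⟨?_, ?_, ?_, ?_⟩ <;>
      simp only [hfold, hstep, PySem.Dict.keys_insert_of_contains d _ hc, hsfold]
    · exact hnd
    · simpa [pvSeenStep, hseen] using hseen ▸ (by simp [hmemk])
    · intro k hk
      rw [pvInner_append, PySem.Dict.getD_insert]
      by_cases hkq : k = qid
      · subst hkq; simp [hmem k hk]
      · have : ¬ qid = k := fun e => hkq e.symm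
        simp [hkq, this, hmem k hk]
    · intro k hk
      have hkq : ¬ qid = k := fun e => hk (e ▸ hmemk)
      rw [pvInner_append]
      simp [hkq, hnmem k hk]
  · -- fresh qid: A appends a new group, seen appends qid
    have hcf : d.contains qid = false := by simpa using hc
    have hnm : qid ∉ d.keys := fun hm => hc ((PySem.Dict.contains_iff_mem_keys d qid).mpr hm)
    have hstep : pvStepA d (qid, q, aid, a, label) = d.insert qid (q, [a]) := by
      simp [pvStepA, PySem.Dict.setdefault_of_not_contains d _ hcf,
        PySem.Dict.getD_insert_self, PySem.Dict.insert_insert_self]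
    have hkeys : (d.insert qid ((q : String), ([a] : List String))).keys = d.keys ++ [qid] :=
      PySem.Dict.keys_insert_of_not_contains d _ hcf
    refine ⟨?_, ?_, ?_, ?_⟩ <;>
      simp only [hfold, hstep, hkeys, hsfold]
    · have := PySem.Dict.nodup_keys_insert d qid ((q : String), ([a] : List String)) hnd
      rwa [hkeys] at this
    · simp [pvSeenStep, ← hseen, hnm]
    · intro k hk
      rw [pvInner_append, PySem.Dict.getD_insert]
      by_cases hkq : k = qid
      · subst hkq; simp [hnmem k hnm]
      · have hk' : k ∈ d.keys := by
          rcases List.mem_append.mp hk with h | h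
          · exact h
          · exact absurd (List.mem_singleton.mp h) hkq
        have : ¬ qid = k := fun e => hkq e.symm
        simp [hkq, this, hmem k hk']
    · intro k hk
      have hk1 : k ∉ d.keys := fun h => hk (List.mem_append.mpr (Or.inl h))
      have hk2 : ¬ qid = k := fun e => hk (List.mem_append.mpr (Or.inr (by simp [e])))
      rw [pvInner_append]
      simp [hk2, hnmem k hk1]

lemma pvInv_all (corpus : List (String × String × String × String × String)) : pvInv corpus := by
  induction corpus using List.reverseRecOn with
  | nil =>
    refine ⟨List.nodup_nil, rfl, ?_, ?_⟩ <;> intro k hk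
    · exact absurd hk (by simp [PySem.Dict.keys, PySem.Dict.empty])
    · rfl
  | append_singleton p s ih => exact pvInv_step p s ih

-- ===== VERDICT =====
theorem listwise_data_spec : Claim_equal_listwise_data := by
  intro corpus _
  unfold Spec_listwise_data listwise_data listwise_data_alt
  obtain ⟨hnd, hseen, hmem, -⟩ := pvInv_all corpus
  set d := corpus.foldl pvStepA PySem.Dict.empty with hd
  have hA : corpus.foldl
      (fun d s =>
        let (qid, q, _aid, a, _label) := s
        let d := d.setdefault qid ("", [])
        d.insert qid (q, (d.getD qid ("", [])).2 ++ [a])) PySem.Dict.empty = d := rfl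
  have hSeen : corpus.foldl (fun seen s => if s.1 ∈ seen then seen else seen ++ [s.1]) [] =
      corpus.foldl pvSeenStep [] := rfl
  have hInner : ∀ qid, List.foldl
      (fun (st : String × List String) s =>
        if s.1 = qid then (s.2.1, st.2 ++ [s.2.2.2.1]) else st) ("", []) corpus =
      pvInner corpus qid := fun _ => rfl
  simp only [hA, hSeen, ← hseen, hInner]
  rw [PySem.List.foldl_append_singleton_eq_map
      (fun k => ((d.getD k ("", [])).1, (d.getD k ("", [])).2)),
    PySem.List.foldl_append_singleton_eq_map
      (fun k => ((pvInner corpus k).1, (pvInner corpus k).2))]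
  simp only [List.nil_append]
  exact List.map_congr_left (fun k hk => by rw [hmem k hk])
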